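-- pv_equiv track=rewrite | github.com/piotrhelm/NESTFUL | data_v2/executable_functions/py_code_file_4320.py | replace_with_escapes
-- ===== SOURCE A (Python) =====
-- from typing import Dict
--
-- def replace_with_escapes(string: str, escape_dict: Dict[str, str]) -> str:
--
--     """Replaces all occurrences of the characters in the passed dictionary with the corresponding escaped values.
--
--     Args:
--
--         string: The input string.
--
--         escape_dict: A dictionary of the form {'char': 'escape_val'}, where 'char' is a character to be replaced and 'escape_val' is its corresponding escaped value.
--
--     """
--
--     replaced_string = ''
--
--     for char in string:
--
--         if char in escape_dict:
--
--             replaced_string += escape_dict[char]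
--
--         else:
--
--             replaced_string += char
--
--     return replaced_string
-- ===== SOURCE B (Python) =====
-- def replace_with_escapes(string, escape_dict):
--     table = {ord(k): v for k, v in escape_dict.items() if len(k) == 1}
--     return string.translate(table)
-- ===== Notes on version B (the rewrite author's own statement) =====
-- stated objective: idiomatic
-- what changed: Replaces the per-character membership-test-and-concatenate loop with a one-time translation table (code point -> replacement) and a single str.translate pass.
import Mathlib
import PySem

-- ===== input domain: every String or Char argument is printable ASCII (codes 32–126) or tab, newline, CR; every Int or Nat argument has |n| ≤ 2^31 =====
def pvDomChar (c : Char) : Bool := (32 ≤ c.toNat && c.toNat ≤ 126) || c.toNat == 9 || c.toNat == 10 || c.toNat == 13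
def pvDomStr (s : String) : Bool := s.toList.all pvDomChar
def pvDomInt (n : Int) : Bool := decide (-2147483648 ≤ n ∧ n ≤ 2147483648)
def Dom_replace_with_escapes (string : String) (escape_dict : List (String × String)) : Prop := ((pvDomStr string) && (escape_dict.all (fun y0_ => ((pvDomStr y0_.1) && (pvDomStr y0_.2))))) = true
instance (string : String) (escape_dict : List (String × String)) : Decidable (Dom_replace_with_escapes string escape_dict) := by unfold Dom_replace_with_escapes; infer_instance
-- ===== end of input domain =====

-- B replaces A's per-character dict-membership loop with a one-time Char-keyed translation table and a single pass (idiomatic str.translate).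
-- ===== PORT A =====
-- A: for each char, membership test on the dict then lookup (first match = dict lookup), appending to an accumulator.
def replace_with_escapes (string : String) (escape_dict : List (String × String)) : String :=
  String.ofList (string.toList.foldl
    (fun acc c =>
      match escape_dict.find? (fun p => p.1 == String.ofList [c]) with
      | some p => acc ++ p.2.toList
      | none   => acc ++ [c])
    [])

-- ===== PORT B =====
-- B: build a Char-keyed translation table once from the length-1 keys, then one table-driven pass.
def pvTable (escape_dict : List (String × String)) : List (Char × String) :=
  escape_dict.filterMap (fun p =>
    match p.1.toList with
    | [c] => some (c, p.2)
    | _   => none)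

def pvTranslate (table : List (Char × String)) (c : Char) : List Char :=
  match table.find? (fun q => q.1 == c) with
  | some q => q.2.toList
  | none   => [c]

def replace_with_escapes_alt (string : String) (escape_dict : List (String × String)) : String :=
  String.ofList ((string.toList.map (pvTranslate (pvTable escape_dict))).flatten)

-- ===== PRECONDITION & SPEC =====
def Spec_replace_with_escapes (string : String) (escape_dict : List (String × String)) (out : String) : Prop := out = replace_with_escapes_alt string escape_dict
instance (string : String) (escape_dict : List (String × String)) (out : String) : Decidable (Spec_replace_with_escapes string escape_dict out) := by unfold Spec_replace_with_escapes; infer_instance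

-- ===== CLAIM (what is proved, stated in full; the proofs are below) =====
def Claim_equal_replace_with_escapes : Prop := ∀ (string : String) (escape_dict : List (String × String)), Dom_replace_with_escapes string escape_dict → Spec_replace_with_escapes string escape_dict (replace_with_escapes string escape_dict)

-- ===== LEMMAS AND PROOFS =====

-- ===== VERDICT (by name: the statement is the Claim_ definition above) =====
-- Per-character agreement: the table lookup computes exactly A's dict lookup on the one-char string.
theorem pvTranslate_table_eq (es : List (String × String)) (c : Char) :
    pvTranslate (pvTable es) c =
      match es.find? (fun p => p.1 == String.ofList [c]) with
      | some p => p.2.toList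
      | none   => [c] := by
  induction es with
  | nil => rfl
  | cons kv es ih =>
    obtain ⟨k, v⟩ := kv
    have hbeq : (k == String.ofList [c]) = (k.toList == [c]) := by simp [String.ext_iff]
    match hk : k.toList with
    | [c'] =>
      simp only [pvTable, List.filterMap_cons, hk, List.find?_cons, hbeq]
      by_cases hc : c' = c
      · subst hc; simp [pvTranslate]
      · have h1 : (c' == c) = false := by simp [hc]
        have h2 : ([c'] == [c]) = false := by simp [hc]
        simp only [h2, pvTranslate, List.find?_cons, h1]
        exact ih
    | [] =>
      simp only [pvTable, List.filterMap_cons, hk, List.find?_cons, hbeq]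
      simp only [show (([] : List Char) == [c]) = false by simp]
      exact ih
    | c1 :: c2 :: rest =>
      simp only [pvTable, List.filterMap_cons, hk, List.find?_cons, hbeq]
      simp only [show ((c1 :: c2 :: rest) == [c]) = false by simp]
      exact ih

theorem replace_with_escapes_spec : Claim_equal_replace_with_escapes := by
  intro string escape_dict _
  unfold Spec_replace_with_escapes replace_with_escapes replace_with_escapes_alt
  have hbody : (fun (acc : List Char) (c : Char) =>
      match escape_dict.find? (fun p => p.1 == String.ofList [c]) with
      | some p => acc ++ p.2.toList
      | none   => acc ++ [c]) =
      fun acc c => acc ++ pvTranslate (pvTable escape_dict) c := by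
    funext acc c
    rw [pvTranslate_table_eq]
    cases escape_dict.find? (fun p => p.1 == String.ofList [c]) <;> rfl
  rw [hbody, PySem.List.foldl_append_eq_flatMap, List.flatMap_def, List.nil_append]
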